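-- pv_equiv track=rewrite | github.com/edt-yxz-zzd/python3_src | script/char/韵/refine_classes.py | refine_classes__impl
-- ===== SOURCE A (Python) =====
-- from collections import defaultdict
--
-- def refine_classes__impl(iterables):
--     obj2idc = defaultdict(set)
--     for i, iterable in enumerate(iterables):
--         for obj in iterable:
--             # multi obj ==>> use set instead of list
--             obj2idc[obj].add(i)
--     idc2objs = defaultdict(list)
--     for obj, idc in obj2idc.items():
--         idc = tuple(sorted(idc))
--         idc2objs[idc].append(obj)
--     return dict(idc2objs)
-- ===== SOURCE B (Python) =====
-- def refine_classes__impl(iterables):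
--     # Different decomposition: dedup objects in first-occurrence order, then
--     # compute each object's index-tuple by a direct membership scan and group.
--     objs = dict.fromkeys(obj for it in iterables for obj in it)
--     result = {}
--     for obj in objs:
--         key = tuple(i for i, it in enumerate(iterables) if obj in it)
--         result[key] = result.get(key, []) + [obj]
--     return result
-- ===== Notes on version B (the rewrite author's own statement) =====
-- stated objective: alternative
-- what changed: Instead of building an obj->index-set table by dict mutation and then regrouping its items, B dedups the objects in first-occurrence order and computes each object's index tuple directly by a membership scan over the iterables, grouping into the result dict in one loop.
import Mathlib
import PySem

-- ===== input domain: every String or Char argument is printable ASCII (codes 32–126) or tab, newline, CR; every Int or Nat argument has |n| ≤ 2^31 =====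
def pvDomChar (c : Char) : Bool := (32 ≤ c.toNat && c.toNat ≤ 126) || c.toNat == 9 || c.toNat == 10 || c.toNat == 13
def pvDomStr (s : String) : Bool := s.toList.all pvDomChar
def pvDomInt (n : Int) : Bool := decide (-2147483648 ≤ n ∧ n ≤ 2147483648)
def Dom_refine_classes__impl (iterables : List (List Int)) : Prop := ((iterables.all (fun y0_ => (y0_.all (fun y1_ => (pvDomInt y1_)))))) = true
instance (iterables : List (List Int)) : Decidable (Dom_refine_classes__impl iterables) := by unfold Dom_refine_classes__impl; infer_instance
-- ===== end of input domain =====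

-- B replaces A's mutate-a-dict-of-sets pass + regrouping pass by a dedup of the objects
-- followed by a direct membership scan per object (alternative decomposition, same results).

-- ===== PORT A =====
def refine_classes__impl (iterables : List (List Int)) : List (List Int × List Int) :=
  -- obj2idc = defaultdict(set); for i, iterable in enumerate(iterables): for obj in iterable: obj2idc[obj].add(i)
  let obj2idc : PySem.Dict Int (PySem.Set Int) :=
    (PySem.List.enumerate iterables).foldl
      (fun d p => p.2.foldl (fun d obj => d.modify obj [] (fun s => PySem.Set.add s p.1)) d)
      PySem.Dict.empty
  -- idc2objs = defaultdict(list); for obj, idc in obj2idc.items(): idc2objs[tuple(sorted(idc))].append(obj)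
  let idc2objs : PySem.Dict (List Int) (List Int) :=
    obj2idc.items.foldl
      (fun d q => d.modify (PySem.List.sorted q.2 (fun x => x)) [] (fun l => l ++ [q.1]))
      PySem.Dict.empty
  idc2objs.items

-- ===== PORT B =====
def refine_classes__impl_alt (iterables : List (List Int)) : List (List Int × List Int) :=
  -- objs = dict.fromkeys(obj for it in iterables for obj in it)
  let objs : List Int := PySem.List.dedup (iterables.flatMap (fun it => it))
  -- for obj in objs: key = tuple(i for i, it in enumerate(iterables) if obj in it); result[key] = result.get(key, []) + [obj]
  let result : PySem.Dict (List Int) (List Int) :=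
    objs.foldl
      (fun d obj =>
        let key := ((PySem.List.enumerate iterables).filter (fun p => p.2.contains obj)).map (fun p => p.1)
        d.insert key (d.getD key [] ++ [obj]))
      PySem.Dict.empty
  result.items

-- ===== PRECONDITION & SPEC =====
def Spec_refine_classes__impl (iterables : List (List Int)) (out : List (List Int × List Int)) : Prop := out = refine_classes__impl_alt iterables
instance (iterables : List (List Int)) (out : List (List Int × List Int)) : Decidable (Spec_refine_classes__impl iterables out) := by unfold Spec_refine_classes__impl; infer_instance

-- ===== CLAIM (what is proved, stated in full; the proofs are below) =====
def Claim_equal_refine_classes__impl : Prop := ∀ (iterables : List (List Int)), Dom_refine_classes__impl iterables → Spec_refine_classes__impl iterables (refine_classes__impl iterables)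

-- ===== LEMMAS AND PROOFS =====

def pvStep (d : PySem.Dict Int (PySem.Set Int)) (p : Int × List Int) : PySem.Dict Int (PySem.Set Int) :=
  p.2.foldl (fun d obj => d.modify obj [] (fun s => PySem.Set.add s p.1)) d

theorem pv_inner_getD (it : List Int) (d : PySem.Dict Int (PySem.Set Int)) (i o : Int) :
    (pvStep d (i, it)).getD o []
      = if it.contains o then PySem.Set.add (d.getD o []) i else d.getD o [] := by
  induction it generalizing d with
  | nil => simp [pvStep]
  | cons a t ih =>
    simp only [pvStep, List.foldl_cons] at *
    rw [ih]
    by_cases hoa : o = a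
    · subst hoa
      simp
    · simp [PySem.Dict.getD_modify, hoa]

theorem pv_outer_getD (ps : List (Int × List Int)) (d : PySem.Dict Int (PySem.Set Int)) (o : Int) :
    (ps.foldl pvStep d).getD o []
      = ((ps.filter (fun p => p.2.contains o)).map (fun p => p.1)).foldl PySem.Set.add (d.getD o []) := by
  induction ps generalizing d with
  | nil => simp
  | cons p ps ih =>
    obtain ⟨i, it⟩ := p
    rw [List.foldl_cons, ih, pv_inner_getD]
    by_cases h : o ∈ it
    · simp [h]
    · simp [h]

theorem pv_update_append (s : PySem.Set Int) (a b : List Int) :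
    PySem.Set.update (PySem.Set.update s a) b = PySem.Set.update s (a ++ b) := by
  simp [PySem.Set.update, List.foldl_append]

theorem pv_outer_keys (ps : List (Int × List Int)) :
    (ps.foldl pvStep PySem.Dict.empty).keys = PySem.List.dedup (ps.flatMap (fun p => p.2)) := by
  have h : ∀ (ps : List (Int × List Int)) (d : PySem.Dict Int (PySem.Set Int)),
      (ps.foldl pvStep d).keys = PySem.Set.update d.keys (ps.flatMap (fun p => p.2)) := by
    intro ps
    induction ps with
    | nil => intro d; simp [PySem.Set.update]
    | cons p ps ih =>
      intro d
      rw [List.foldl_cons, ih, List.flatMap_cons, ← pv_update_append]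
      congr 1
      exact PySem.Dict.keys_foldl_modify p.2 [] (fun _ _ s => PySem.Set.add s p.1) d
  rw [h, PySem.Dict.keys_empty, PySem.List.dedup_eq_ofList]
  rfl

def pvK (iterables : List (List Int)) (o : Int) : List Int :=
  ((PySem.List.enumerate iterables).filter (fun p => p.2.contains o)).map (fun p => p.1)

theorem pv_K_pairwise (iterables : List (List Int)) (o : Int) :
    (pvK iterables o).Pairwise (· < ·) := by
  unfold pvK
  rw [List.pairwise_map]
  exact (PySem.List.pairwise_lt_enumerate iterables 0).filter _

theorem pv_foldl_add_nodup (t : List Int) :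
    ∀ (s : List Int), (s ++ t).Nodup → t.foldl PySem.Set.add s = s ++ t := by
  induction t with
  | nil => intro s _; simp
  | cons a t ih =>
    intro s h
    have ha : a ∉ s := by
      intro hmem
      exact (List.disjoint_of_nodup_append h) hmem (List.mem_cons_self ..)
    rw [List.foldl_cons, PySem.Set.add_of_not_mem ha, ih (s ++ [a]) (by simpa using h)]
    simp

theorem pv_ofList_nodup (xs : List Int) (h : xs.Nodup) : PySem.Set.ofList xs = xs := by
  rw [PySem.Set.ofList_eq_foldl]
  simpa using pv_foldl_add_nodup xs [] (by simpa using h)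

theorem pv_flat_enumerate (iterables : List (List Int)) (s : Int) :
    (PySem.List.enumerate iterables s).flatMap (fun p => p.2) = iterables.flatMap (fun it => it) := by
  induction iterables generalizing s with
  | nil => simp [PySem.List.enumerate_nil]
  | cons a t ih => rw [PySem.List.enumerate_cons, List.flatMap_cons, List.flatMap_cons, ih]

theorem pv_items_phase1 (iterables : List (List Int)) :
    ((PySem.List.enumerate iterables).foldl pvStep PySem.Dict.empty).items
      = (PySem.List.dedup (iterables.flatMap (fun it => it))).map (fun o => (o, pvK iterables o)) := by
  have hkeys := pv_outer_keys (PySem.List.enumerate iterables)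
  rw [pv_flat_enumerate] at hkeys
  have hnd : ((PySem.List.enumerate iterables).foldl pvStep PySem.Dict.empty).keys.Nodup := by
    rw [hkeys]; exact PySem.List.nodup_dedup _
  rw [PySem.Dict.items_eq_map_keys _ hnd [], hkeys]
  apply List.map_congr_left
  intro o _
  rw [pv_outer_getD, PySem.Dict.getD_empty, ← PySem.Set.ofList_eq_foldl]
  have : ((PySem.List.enumerate iterables).filter (fun p => p.2.contains o)).map (fun p => p.1) = pvK iterables o := rfl
  rw [this, pv_ofList_nodup _ ((pv_K_pairwise iterables o).imp (fun hab => ne_of_lt hab))]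

-- ===== VERDICT (by name: the statement is the Claim_ definition above) =====
theorem refine_classes__impl_spec : Claim_equal_refine_classes__impl := by
  intro iterables _
  show refine_classes__impl iterables = refine_classes__impl_alt iterables
  simp only [refine_classes__impl, refine_classes__impl_alt]
  rw [show (PySem.List.enumerate iterables).foldl
        (fun d p => p.2.foldl (fun d obj => d.modify obj [] (fun s => PySem.Set.add s p.1)) d)
        PySem.Dict.empty
      = (PySem.List.enumerate iterables).foldl pvStep PySem.Dict.empty from rfl,
    pv_items_phase1, List.foldl_map]
  congr 1
  apply PySem.List.foldl_congr_mem
  intro acc o _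
  rw [PySem.List.sorted_eq_self_of_pairwise _ _ ((pv_K_pairwise iterables o).imp (fun h => le_of_lt h))]
  rfl
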